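-- pv_equiv track=rewrite | github.com/peter-sushko/advent_of_code_2023 | day14/part_1.py | tilt_left
-- ===== SOURCE A (Python) =====
-- def tilt_left(sample_string) -> str:
--     '''Tilts the platform left.
--
--     Sorts each substring, separated by a '#' character, in descending order and
--     concatenates them to form a new string. The sorting is applied to each substring
--     individually.
--
--     Parameters:
--     sample_string (str): A string that may contain multiple substrings separated by
--                          '#' characters.
--
--     Returns:
--     str: A new string formed by concatenating the sorted substrings. Each substring
--          is sorted in descending order, and the original positions of '#' are preserved.
--
--     Example:
--     >>> tilt_left("..O#O.O#O..O.")
--     "O..#OO.#OO..."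
--
--     '''
--     soln = ''
--     start = 0
--     while start < len(sample_string):
--         end = sample_string.find('#', start)
--         if end == -1: # Handling the end of the string.
--             end = len(sample_string)
--         substring = ''.join(sorted(sample_string[start:end+1], reverse=True))
--         soln = soln + substring
--         start = end + 1
--     return soln
-- ===== SOURCE B (Python) =====
-- def tilt_left(sample_string) -> str:
--     '''Counting-sort re-implementation: one pass over the string keeping a
--     128-slot character-count array; each '#' (counted into its own segment,
--     where it sorts into place) flushes the counts in descending code order.'''
--     out = []
--     counts = [0] * 128
--     for ch in sample_string:
--         counts[ord(ch)] += 1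
--         if ch == '#':
--             for code in range(127, -1, -1):
--                 out.append(chr(code) * counts[code])
--             counts = [0] * 128
--     for code in range(127, -1, -1):
--         out.append(chr(code) * counts[code])
--     return ''.join(out)
-- ===== Notes on version B (the rewrite author's own statement) =====
-- stated objective: faster
-- what changed: Replaces the find/slice/comparison-sort-per-segment loop with a single pass that maintains a 128-slot character-count array and flushes it in descending code order at each segment separator (counting sort), removing the per-segment comparison sort.
import Mathlib
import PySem

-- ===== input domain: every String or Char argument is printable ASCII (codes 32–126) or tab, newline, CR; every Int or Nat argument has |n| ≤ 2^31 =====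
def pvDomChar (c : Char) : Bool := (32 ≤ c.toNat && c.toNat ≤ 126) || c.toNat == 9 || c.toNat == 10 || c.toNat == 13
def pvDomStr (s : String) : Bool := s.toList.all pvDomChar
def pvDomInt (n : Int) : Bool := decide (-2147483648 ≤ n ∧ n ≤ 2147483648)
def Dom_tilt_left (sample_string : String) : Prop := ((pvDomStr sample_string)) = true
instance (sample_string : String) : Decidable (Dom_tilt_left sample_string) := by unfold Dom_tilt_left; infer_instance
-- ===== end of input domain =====

-- B replaces A's find/slice/comparison-sort loop by one pass with a 128-slot count
-- array flushed in descending code order at each segment separator (counting sort); same value on Dom.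

-- ===== PORT A =====
-- A: while start < len: end = find('#', start) (-1 ↦ len); sort s[start:end+1] descending; start = end+1.
def pvFindEnd (s : List Char) (start : Nat) : Nat :=
  let e : Int := PySem.Chars.findFrom s ['#'] (start : Int) none
  if e = -1 then s.length else e.toNat

theorem pvFindEnd_ge (s : List Char) (start : Nat) (h : start ≤ s.length) :
    start ≤ pvFindEnd s start := by
  unfold pvFindEnd
  by_cases he : PySem.Chars.findFrom s ['#'] (start : Int) none = -1
  · simp [he]; omega
  · have hs := PySem.Chars.findFrom_natCast_spec s ['#'] start h he
    simp [he]
    omega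

def tiltALoop (s : List Char) (start : Nat) (soln : List Char) : List Char :=
  if h : start < s.length then
    tiltALoop s (pvFindEnd s start + 1)
      (soln ++ PySem.List.sorted
        (PySem.List.slice s (some (start : Int)) (some ((pvFindEnd s start : Int) + 1)))
        (fun c => c) true)
  else soln
termination_by s.length - start
decreasing_by have := pvFindEnd_ge s start (le_of_lt h); omega

def tilt_left (sample_string : String) : String :=
  String.mk (tiltALoop sample_string.toList 0 [])

-- ===== PORT B =====
def pvBump (counts : List Nat) (c : Char) : List Nat :=
  counts.set c.toNat (counts.getD c.toNat 0 + 1)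

def pvEmit (counts : List Nat) : List Char :=
  (PySem.List.pyRange 127 (-1) (-1)).flatMap
    (fun code => List.replicate (counts.getD code.toNat 0) (Char.ofNat code.toNat))

def pvStep (st : List Char × List Nat) (ch : Char) : List Char × List Nat :=
  let counts := pvBump st.2 ch
  if ch = '#' then (st.1 ++ pvEmit counts, List.replicate 128 0) else (st.1, counts)

def tilt_left_alt (sample_string : String) : String :=
  let st := sample_string.toList.foldl pvStep ([], List.replicate 128 0)
  String.mk (st.1 ++ pvEmit st.2)

-- ===== PRECONDITION & SPEC =====
def Spec_tilt_left (sample_string : String) (out : String) : Prop := out = tilt_left_alt sample_string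
instance (sample_string : String) (out : String) : Decidable (Spec_tilt_left sample_string out) := by unfold Spec_tilt_left; infer_instance

-- ===== CLAIM (what is proved, stated in full; the proofs are below) =====
def Claim_equal_tilt_left : Prop := ∀ (sample_string : String), Dom_tilt_left sample_string → Spec_tilt_left sample_string (tilt_left sample_string)

-- ===== LEMMAS AND PROOFS =====

theorem pv_prefix_singleton_iff (a : Char) (l : List Char) : [a] <+: l ↔ l.head? = some a := by
  cases l with
  | nil => simp
  | cons x xs => simp [List.cons_prefix_cons, eq_comm]

theorem pv_infix_singleton_iff (a : Char) (l : List Char) : [a] <:+: l ↔ a ∈ l := by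
  constructor
  · rintro ⟨s, t, rfl⟩; simp
  · intro h; obtain ⟨s, t, rfl⟩ := List.append_of_mem h; exact ⟨s, t, by simp⟩

theorem pv_find_nil (a : Char) : PySem.Chars.find [] [a] = -1 := by
  rw [PySem.Chars.find_eq_neg_one_iff, pv_infix_singleton_iff]; simp

theorem pv_find_cons_self (a : Char) (t : List Char) :
    PySem.Chars.find (a :: t) [a] = 0 := by
  have h0 : (0:Int) ≤ PySem.Chars.find (a :: t) [a] := by
    rw [PySem.Chars.find_nonneg_iff, pv_infix_singleton_iff]; simp
  have hs := PySem.Chars.find_spec h0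
  by_contra hne
  have h1 : 0 < (PySem.Chars.find (a :: t) [a]).toNat := by omega
  exact hs.2 0 h1 (by simp [pv_prefix_singleton_iff])

theorem pv_find_cons_of_ne (a c : Char) (t : List Char) (hne : c ≠ a) :
    PySem.Chars.find (c :: t) [a] =
      if PySem.Chars.find t [a] = -1 then -1 else PySem.Chars.find t [a] + 1 := by
  by_cases h : PySem.Chars.find t [a] = -1
  · rw [if_pos h]
    rw [PySem.Chars.find_eq_neg_one_iff, pv_infix_singleton_iff] at h ⊢
    simp [Ne.symm hne, h]
  · rw [if_neg h]
    have hn : (0:Int) ≤ PySem.Chars.find t [a] := by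
      have := PySem.Chars.neg_one_le_find t [a]; omega
    have hts := PySem.Chars.find_spec hn
    have hmem : a ∈ t := by
      have := hts.1
      rw [pv_prefix_singleton_iff, List.head?_drop] at this
      exact List.mem_of_getElem? this
    have h0 : (0:Int) ≤ PySem.Chars.find (c :: t) [a] := by
      rw [PySem.Chars.find_nonneg_iff, pv_infix_singleton_iff]; simp [hmem]
    have hcs := PySem.Chars.find_spec h0
    set g := PySem.Chars.find (c :: t) [a] with hg
    set f := PySem.Chars.find t [a] with hf
    have hgpos : 0 < g.toNat := by
      rcases Nat.eq_zero_or_pos g.toNat with h0' | h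
      · exfalso
        have := hcs.1
        rw [h0'] at this
        rw [pv_prefix_singleton_iff] at this
        simp at this
        exact hne this
      · exact h
    -- prefix at g.toNat in c::t means prefix at g.toNat - 1 in t
    have hdrop : ∀ i : Nat, 0 < i → List.drop i (c :: t) = List.drop (i-1) t := by
      intro i hi; cases i with
      | zero => omega
      | succ n => simp
    have hge : f.toNat ≤ g.toNat - 1 := by
      by_contra hlt
      push_neg at hlt
      have := hts.2 (g.toNat - 1) hlt
      rw [← hdrop g.toNat hgpos] at this
      exact this hcs.1
    have hle : g.toNat ≤ f.toNat + 1 := by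
      by_contra hlt
      push_neg at hlt
      have := hcs.2 (f.toNat + 1) hlt
      rw [hdrop (f.toNat+1) (by omega)] at this
      simp at this
      exact this hts.1
    omega

def pvCounts (t : List Char) : List Nat := t.foldl pvBump (List.replicate 128 0)

def pvSortDesc (t : List Char) : List Char := PySem.List.sorted t (fun c => c) true

theorem pv_toNat_ofNat {k : Nat} (hk : k < 128) : (Char.ofNat k).toNat = k := by
  rw [Char.toNat_ofNat, if_pos]; left; omega

-- the descending 128-code range splits at any k < 128
theorem pv_range_split {k : Nat} (hk : k < 128) :
    PySem.List.pyRange 127 (-1) (-1) =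
      (PySem.List.pyRange ((k:Int)+1) 128).reverse ++ (k:Int) ::
      (PySem.List.pyRange 0 (k:Int)).reverse := by
  rw [PySem.List.pyRange_neg_one_eq_reverse]
  norm_num
  rw [PySem.List.pyRange_one_append 0 (k:Int) 128 (by omega) (by omega),
      PySem.List.pyRange_one_cons (by omega : (k:Int) < 128)]

theorem pv_emit_bump_perm (counts : List Nat) (hlen : counts.length = 128)
    (c : Char) (hc : c.toNat < 128) :
    (pvEmit (pvBump counts c)).Perm (c :: pvEmit counts) := by
  unfold pvEmit pvBump
  rw [pv_range_split hc]
  simp only [List.flatMap_append, List.flatMap_cons, Int.toNat_natCast, Char.ofNat_toNat]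
  have hne : ∀ code : Int, code ∈ (PySem.List.pyRange ((c.toNat:Int)+1) 128).reverse ∨
      code ∈ (PySem.List.pyRange 0 (c.toNat:Int)).reverse → code.toNat ≠ c.toNat := by
    intro code hmem
    rcases hmem with h | h <;> rw [List.mem_reverse, PySem.List.mem_pyRange_one] at h <;> omega
  have hblock : ∀ (l : List Int), (∀ code ∈ l, code.toNat ≠ c.toNat) →
      l.flatMap (fun code => List.replicate ((counts.set c.toNat (counts.getD c.toNat 0 + 1)).getD code.toNat 0) (Char.ofNat code.toNat)) =
      l.flatMap (fun code => List.replicate (counts.getD code.toNat 0) (Char.ofNat code.toNat)) := by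
    intro l hl
    apply List.flatMap_congr
    intro code hcode
    have := hl code hcode
    rw [List.getD_eq_getElem?_getD, List.getElem?_set, if_neg (by omega), ← List.getD_eq_getElem?_getD]
  rw [hblock _ (fun code h => hne code (Or.inl h)), hblock _ (fun code h => hne code (Or.inr h))]
  have hmid : (counts.set c.toNat (counts.getD c.toNat 0 + 1)).getD c.toNat 0
      = counts.getD c.toNat 0 + 1 := by
    rw [List.getD_eq_getElem?_getD, List.getElem?_set, if_pos rfl, if_pos (by omega)]
    simp
  rw [hmid, List.replicate_succ]
  exact List.perm_middle

theorem pv_foldl_bump_length (t : List Char) (counts : List Nat) :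
    (t.foldl pvBump counts).length = counts.length := by
  induction t generalizing counts with
  | nil => rfl
  | cons c t ih => rw [List.foldl_cons, ih]; simp [pvBump]

theorem pv_counts_length (t : List Char) : (pvCounts t).length = 128 := by
  unfold pvCounts; rw [pv_foldl_bump_length]; simp

theorem pv_getD_replicate_zero (i : Nat) : (List.replicate 128 (0:Nat)).getD i 0 = 0 := by
  rw [List.getD_eq_getElem?_getD, List.getElem?_replicate]
  split <;> simp

theorem pv_emit_zero : pvEmit (List.replicate 128 0) = [] := by
  unfold pvEmit
  rw [List.flatMap_eq_nil_iff]
  intro code _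
  rw [pv_getD_replicate_zero]
  simp

theorem pv_emit_counts_perm (t : List Char) (hdom : ∀ c ∈ t, c.toNat < 128) :
    (pvEmit (pvCounts t)).Perm t := by
  induction t using List.reverseRecOn with
  | nil => rw [show pvCounts [] = List.replicate 128 0 from rfl, pv_emit_zero]
  | append_singleton t c ih =>
    have hc : c.toNat < 128 := hdom c (by simp)
    have ht : ∀ x ∈ t, x.toNat < 128 := fun x hx => hdom x (by simp [hx])
    have h1 : pvCounts (t ++ [c]) = pvBump (pvCounts t) c := by
      unfold pvCounts; rw [List.foldl_append]; rfl
    have p1 : (pvEmit (pvCounts (t ++ [c]))).Perm (c :: pvEmit (pvCounts t)) := by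
      rw [h1]; exact pv_emit_bump_perm _ (pv_counts_length t) c hc
    exact (p1.trans ((ih ht).cons c)).trans (List.perm_append_singleton c t).symm

theorem pv_flat_pairwise (counts : List Nat) (codes : List Int)
    (hp : codes.Pairwise (fun a b => b < a)) (hb : ∀ x ∈ codes, 0 ≤ x ∧ x < 128) :
    (codes.flatMap (fun code =>
      List.replicate (counts.getD code.toNat 0) (Char.ofNat code.toNat))).Pairwise
      (fun a b => b ≤ a) := by
  induction codes with
  | nil => simp
  | cons code rest ih =>
    rw [List.flatMap_cons, List.pairwise_append]
    rw [List.pairwise_cons] at hp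
    refine ⟨?_, ih hp.2 (fun x hx => hb x (by simp [hx])), ?_⟩
    · rw [List.pairwise_replicate]; right; exact le_refl _
    · intro a ha b hbm
      obtain ⟨d, hd, hbrep⟩ := List.mem_flatMap.mp hbm
      have ha' := List.eq_of_mem_replicate ha
      have hb' := List.eq_of_mem_replicate hbrep
      have h1 := hb code (by simp)
      have h2 := hb d (by simp [hd])
      have h3 := hp.1 d hd
      subst ha' hb'
      have e1 := pv_toNat_ofNat (k := code.toNat) (by omega)
      have e2 := pv_toNat_ofNat (k := d.toNat) (by omega)
      exact Char.le_def.mpr (show (Char.ofNat d.toNat).toNat ≤ (Char.ofNat code.toNat).toNat by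
        rw [e1, e2]; omega)

theorem pv_emit_pairwise (counts : List Nat) :
    (pvEmit counts).Pairwise (fun a b : Char => b ≤ a) := by
  unfold pvEmit
  apply pv_flat_pairwise
  · rw [PySem.List.pyRange_neg_one_eq_reverse, List.pairwise_reverse]
    norm_num
    exact PySem.List.pairwise_lt_pyRange_one 0 128
  · intro x hx
    rw [PySem.List.mem_pyRange_neg_one] at hx
    omega

theorem pv_sortDesc_eq_emit (t : List Char) (hdom : ∀ c ∈ t, c.toNat < 128) :
    pvSortDesc t = pvEmit (pvCounts t) := by
  apply PySem.List.eq_of_perm_of_pairwise_le_of_injective (fun c : Char => -(c.toNat : Int))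
  · intro a b h
    simp only [neg_inj, Int.natCast_inj] at h
    rw [← Char.ofNat_toNat a, ← Char.ofNat_toNat b, h]
  · exact (PySem.List.sorted_perm t _ true).trans (pv_emit_counts_perm t hdom).symm
  · exact (PySem.List.sorted_pairwise_rev t _).imp (fun h => by simp; exact Char.le_def.mp h)
  · exact (pv_emit_pairwise _).imp (fun h => by simp; exact Char.le_def.mp h)

-- helper: a found '#' lies inside the string
theorem pv_find_lt_length (t : List Char) (h : PySem.Chars.find t ['#'] ≠ -1) :
    0 ≤ PySem.Chars.find t ['#'] ∧ (PySem.Chars.find t ['#']).toNat < t.length := by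
  have h0 : (0:Int) ≤ PySem.Chars.find t ['#'] := by
    have := PySem.Chars.neg_one_le_find t ['#']; omega
  have hs := (PySem.Chars.find_spec h0).1
  refine ⟨h0, ?_⟩
  have hne : t.drop (PySem.Chars.find t ['#']).toNat ≠ [] := by
    intro hnil; rw [hnil] at hs; simp at hs
  have := List.length_drop (l := t) (i := (PySem.Chars.find t ['#']).toNat)
  have hlen : t.drop (PySem.Chars.find t ['#']).toNat ≠ [] → 0 < t.length - (PySem.Chars.find t ['#']).toNat := by
    intro _
    by_contra hc
    apply hne
    rw [List.drop_eq_nil_iff]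
    omega
  have := hlen hne
  omega

def specG (t : List Char) : List Char :=
  if h : PySem.Chars.find t ['#'] = -1 then pvSortDesc t
  else
    pvSortDesc (t.take ((PySem.Chars.find t ['#']).toNat + 1)) ++
      specG (t.drop ((PySem.Chars.find t ['#']).toNat + 1))
termination_by t.length
decreasing_by
  have := pv_find_lt_length t h
  simp only [List.length_drop]
  omega

def bSpec (counts : List Nat) : List Char → List Char
  | [] => pvEmit counts
  | c :: t =>
    if c = '#' then pvEmit (pvBump counts c) ++ bSpec (List.replicate 128 0) t
    else bSpec (pvBump counts c) t

theorem pv_foldl_step_eq (t : List Char) :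
    ∀ (acc : List Char) (counts : List Nat),
      (t.foldl pvStep (acc, counts)).1 ++ pvEmit (t.foldl pvStep (acc, counts)).2 =
        acc ++ bSpec counts t := by
  induction t with
  | nil => intro acc counts; rfl
  | cons c t ih =>
    intro acc counts
    rw [List.foldl_cons]
    by_cases hc : c = '#'
    · rw [show pvStep (acc, counts) c = (acc ++ pvEmit (pvBump counts c), List.replicate 128 0) by
        simp [pvStep, hc]]
      rw [ih, bSpec, if_pos hc, List.append_assoc]
    · rw [show pvStep (acc, counts) c = (acc, pvBump counts c) by simp only [pvStep, if_neg hc]]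
      rw [ih, bSpec, if_neg hc]

theorem pv_specG_def (t : List Char) :
    specG t = if PySem.Chars.find t ['#'] = -1 then pvSortDesc t
      else pvSortDesc (t.take ((PySem.Chars.find t ['#']).toNat + 1)) ++
        specG (t.drop ((PySem.Chars.find t ['#']).toNat + 1)) := by
  rw [specG]
  split <;> simp_all

theorem pv_bSpec_eq (t : List Char) : ∀ pending : List Char,
    (∀ c ∈ pending, c.toNat < 128) → (∀ c ∈ t, c.toNat < 128) →
    bSpec (pvCounts pending) t =
      if PySem.Chars.find t ['#'] = -1 then pvSortDesc (pending ++ t)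
      else pvSortDesc (pending ++ t.take ((PySem.Chars.find t ['#']).toNat + 1)) ++
           specG (t.drop ((PySem.Chars.find t ['#']).toNat + 1)) := by
  induction t with
  | nil =>
    intro pending hp _
    rw [if_pos (pv_find_nil '#'), List.append_nil]
    show pvEmit (pvCounts pending) = pvSortDesc pending
    exact (pv_sortDesc_eq_emit pending hp).symm
  | cons c t ih =>
    intro pending hp hct
    have hc : c.toNat < 128 := hct c (by simp)
    have ht : ∀ x ∈ t, x.toNat < 128 := fun x hx => hct x (by simp [hx])
    have hbump : pvBump (pvCounts pending) c = pvCounts (pending ++ [c]) := by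
      unfold pvCounts; rw [List.foldl_append]; rfl
    by_cases hch : c = '#'
    · subst hch
      show pvEmit (pvBump (pvCounts pending) '#') ++ bSpec (List.replicate 128 0) t = _
      rw [pv_find_cons_self, if_neg (by norm_num)]
      have h1 : pvEmit (pvBump (pvCounts pending) '#') = pvSortDesc (pending ++ ['#']) := by
        rw [hbump]
        exact (pv_sortDesc_eq_emit (pending ++ ['#'])
          (by intro x hx; rcases List.mem_append.mp hx with h | h
              · exact hp x h
              · simp at h; subst h; decide)).symm
      have h2 : bSpec (List.replicate 128 0) t = specG t := by
        have := ih [] (by simp) ht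
        rw [show (List.replicate 128 0 : List Nat) = pvCounts [] from rfl, this, pv_specG_def t]
        simp
      rw [h1, h2]
      norm_num [List.take_succ_cons, List.drop_succ_cons]
    · rw [show bSpec (pvCounts pending) (c :: t) = bSpec (pvBump (pvCounts pending) c) t from by
        conv_lhs => rw [bSpec]
        rw [if_neg hch]]
      rw [hbump, ih (pending ++ [c])
        (by intro x hx; rcases List.mem_append.mp hx with h | h
            · exact hp x h
            · simp at h; subst h; exact hc) ht]
      rw [pv_find_cons_of_ne '#' c t hch]
      by_cases hf : PySem.Chars.find t ['#'] = -1
      · rw [if_pos hf, if_pos hf, if_pos (rfl : (-1:Int) = -1)]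
        rw [List.append_assoc]
        rfl
      · have hf0 : (0:Int) ≤ PySem.Chars.find t ['#'] := by
          have := PySem.Chars.neg_one_le_find t ['#']; omega
        rw [if_neg hf, if_neg hf, if_neg (show ¬(PySem.Chars.find t ['#'] + 1 = -1) by omega)]
        have htn : (PySem.Chars.find t ['#'] + 1).toNat = (PySem.Chars.find t ['#']).toNat + 1 := by
          omega
        rw [htn, List.take_succ_cons, List.drop_succ_cons, List.append_assoc]
        rfl

theorem pv_specG_nil : specG [] = [] := by
  rw [pv_specG_def, if_pos (pv_find_nil '#')]
  exact (PySem.List.sorted_eq_nil_iff _ _ _).mpr rfl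

theorem pv_findEnd_eq (s : List Char) (start : Nat) (h : start ≤ s.length) :
    pvFindEnd s start =
      if PySem.Chars.find (s.drop start) ['#'] = -1 then s.length
      else start + (PySem.Chars.find (s.drop start) ['#']).toNat := by
  unfold pvFindEnd
  rw [PySem.Chars.findFrom_natCast s ['#'] start h]
  by_cases hf : PySem.Chars.find (s.drop start) ['#'] = -1
  · rw [if_pos hf, if_pos hf, if_pos (rfl : (-1:Int) = -1)]
  · have hf0 : (0:Int) ≤ PySem.Chars.find (s.drop start) ['#'] := by
      have := PySem.Chars.neg_one_le_find (s.drop start) ['#']; omega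
    rw [if_neg hf, if_neg hf, if_neg (by omega : ¬((start:Int) + PySem.Chars.find (s.drop start) ['#'] = -1))]
    omega

theorem pv_tiltALoop_eq (k : Nat) : ∀ (s : List Char) (start : Nat) (soln : List Char),
    s.length - start < k → tiltALoop s start soln = soln ++ specG (s.drop start) := by
  induction k with
  | zero => intro s start soln h; omega
  | succ n ih =>
    intro s start soln hk
    rw [tiltALoop]
    by_cases h : start < s.length
    · rw [dif_pos h]
      have hstart : start ≤ s.length := le_of_lt h
      by_cases hf : PySem.Chars.find (s.drop start) ['#'] = -1
      · have hFE : pvFindEnd s start = s.length := by rw [pv_findEnd_eq s start hstart, if_pos hf]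
        have hslice : PySem.List.slice s (some (start : Int)) (some ((s.length : Int) + 1)) = s.drop start := by
          rw [show ((s.length : Int) + 1) = ((s.length + 1 : Nat) : Int) by push_cast; ring]
          rw [PySem.List.slice_toNat s (by omega) (by omega)]
          simp only [Int.toNat_natCast]
          apply List.take_of_length_le
          simp
          omega
        rw [hFE, hslice]
        have hrec := ih s (s.length + 1)
          (soln ++ PySem.List.sorted (s.drop start) (fun c => c) true)
          (show s.length - (s.length + 1) < n by omega)
        rw [hrec]
        rw [show List.drop (s.length + 1) s = [] from List.drop_eq_nil_of_le (by omega),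
            pv_specG_nil, List.append_nil]
        rw [pv_specG_def (s.drop start), if_pos hf]
        rfl
      · have hlt := pv_find_lt_length (s.drop start) hf
        set fn := (PySem.Chars.find (s.drop start) ['#']).toNat with hfn
        have hFE : pvFindEnd s start = start + fn := by rw [pv_findEnd_eq s start hstart, if_neg hf]
        have hslice : PySem.List.slice s (some (start : Int)) (some (((start + fn : Nat) : Int) + 1)) =
            (s.drop start).take (fn + 1) := by
          rw [show (((start + fn : Nat) : Int) + 1) = ((start + fn + 1 : Nat) : Int) by push_cast; ring]
          rw [PySem.List.slice_toNat s (by omega) (by omega)]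
          simp only [Int.toNat_natCast]
          congr 1
          omega
        rw [hFE, hslice]
        have hlen : s.length - (start + fn + 1) < n := by
          simp only [List.length_drop] at hlt
          omega
        have hrec := ih s (start + fn + 1)
          (soln ++ PySem.List.sorted ((s.drop start).take (fn + 1)) (fun c => c) true) hlen
        rw [hrec]
        rw [pv_specG_def (s.drop start), if_neg hf, ← hfn]
        rw [show s.drop (start + fn + 1) = (s.drop start).drop (fn + 1) by
          rw [List.drop_drop]; congr 1]
        rw [List.append_assoc]
        rfl
    · rw [dif_neg h]
      rw [List.drop_eq_nil_of_le (by omega), pv_specG_nil, List.append_nil]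

theorem pv_tilt_main (t : List Char) (hdc : ∀ c ∈ t, c.toNat < 128) :
    tiltALoop t 0 [] =
      (t.foldl pvStep ([], List.replicate 128 0)).1 ++
        pvEmit (t.foldl pvStep ([], List.replicate 128 0)).2 := by
  rw [pv_tiltALoop_eq (t.length + 1) t 0 [] (by omega), List.drop_zero, List.nil_append]
  rw [pv_foldl_step_eq t [] (List.replicate 128 0), List.nil_append]
  rw [show (List.replicate 128 0 : List Nat) = pvCounts [] from rfl]
  rw [pv_bSpec_eq t [] (by simp) hdc]
  rw [pv_specG_def t]
  simp

-- ===== VERDICT (by name: the statement is the Claim_ definition above) =====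
theorem tilt_left_spec : Claim_equal_tilt_left := by
  intro s hdom
  unfold Spec_tilt_left tilt_left tilt_left_alt
  have hdc : ∀ c ∈ s.toList, c.toNat < 128 := by
    intro c hc
    have h := List.all_eq_true.mp hdom c hc
    simp only [pvDomChar, Bool.or_eq_true, Bool.and_eq_true, decide_eq_true_eq, beq_iff_eq] at h
    omega
  rw [pv_tilt_main s.toList hdc]
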